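-- pv_equiv track=rewrite | github.com/rakoort99/round_type_effect | data/round_records_fixer.py | onewordify
-- ===== SOURCE A (Python) =====
-- def onewordify(string, td_dict):
--     """converts teamcodes to one word"""
--     words = string.split()
--     for it in range(1, len(words)):
--         firstpart = " ".join(words[:-it])
--         lastpart = " ".join(words[-it:])
--         try:
--             newpart = td_dict[firstpart]
--             return " ".join([newpart, lastpart])
--         except:  # noqa: E722
--             pass
--     return string
-- ===== SOURCE B (Python) =====
-- def onewordify(string, td_dict):
--     """converts teamcodes to one word"""
--     words = string.split()
--     n = len(words)
--     # prefix joins, built incrementally front to back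
--     pref = []
--     acc = ""
--     for w in words:
--         acc = w if not pref else acc + " " + w
--         pref.append(acc)
--     # index: each proper prefix join -> its suffix join (built back to front)
--     rest = {}
--     suf = words[n - 1] if n else ""
--     for i in range(n - 1, 0, -1):
--         rest[pref[i - 1]] = suf
--         suf = words[i - 1] + " " + suf
--     # one scan of the dictionary: keep the longest key that is a prefix join
--     best = None
--     for k, v in td_dict.items():
--         if k in rest and (best is None or len(k) > len(best[0])):
--             best = (k, v)
--     if best is None:
--         return string
--     return best[1] + " " + rest[best[0]]
-- ===== Notes on version B (the rewrite author's own statement) =====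
-- stated objective: alternative
-- what changed: A loops over split points, re-joining both halves of the word list and attempting a dict lookup at each; B never loops over split points at lookup time: it builds all prefix- and suffix-joins incrementally in two linear passes, indexes prefix->suffix in a hash map, and then makes a single scan over the dictionary's entries keeping the longest key that is a prefix-join.
import Mathlib
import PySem

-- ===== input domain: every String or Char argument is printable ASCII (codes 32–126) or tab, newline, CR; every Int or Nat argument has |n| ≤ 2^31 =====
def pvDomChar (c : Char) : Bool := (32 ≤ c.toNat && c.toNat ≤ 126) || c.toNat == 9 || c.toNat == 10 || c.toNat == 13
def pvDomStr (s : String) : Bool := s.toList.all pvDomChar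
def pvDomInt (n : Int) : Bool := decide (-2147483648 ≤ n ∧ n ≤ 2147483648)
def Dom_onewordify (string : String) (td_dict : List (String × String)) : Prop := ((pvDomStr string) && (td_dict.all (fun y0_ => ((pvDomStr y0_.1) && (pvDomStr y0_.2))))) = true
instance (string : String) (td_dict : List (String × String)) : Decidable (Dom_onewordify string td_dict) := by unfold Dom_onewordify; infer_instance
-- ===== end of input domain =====

-- B replaces A's loop over split points (which re-joins both halves of the word list and tries a
-- dict lookup at each split) by two incremental linear passes building all prefix- and suffix-joins,
-- a hash index prefix-join -> suffix-join, and a single scan of the dictionary entries keeping the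
-- longest key that is a prefix-join; objective: alternative.

-- ===== PORT A =====
def onewordifyGoA (string : String) (td_dict : List (String × String)) (words : List String) : List Int → String
  | [] => string
  | it :: rest =>
    let firstpart := PySem.Str.join " " (PySem.List.slice words none (some (-it)))
    let lastpart := PySem.Str.join " " (PySem.List.slice words (some (-it)) none)
    match List.lookup firstpart td_dict with
    | some newpart => PySem.Str.join " " [newpart, lastpart]
    | none => onewordifyGoA string td_dict words rest

def onewordify (string : String) (td_dict : List (String × String)) : String :=
  let words := PySem.Str.split₀ string
  onewordifyGoA string td_dict words (PySem.List.pyRange 1 (words.length : Int) 1)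

-- ===== PORT B =====
-- loop 1: acc = w if not pref else acc + " " + w; pref.append(acc)
def owStep1 (st : String × List String) (w : String) : String × List String :=
  let acc := if st.2.isEmpty then w else st.1 ++ " " ++ w
  (acc, st.2 ++ [acc])

-- loop 2 body: rest[pref[i-1]] = suf; suf = words[i-1] + " " + suf
def owStep2 (words pref : List String) (st : PySem.Dict String String × String) (i : Int) : PySem.Dict String String × String :=
  (st.1.insert (PySem.List.pyGetD pref (i - 1) "") st.2,
   PySem.List.pyGetD words (i - 1) "" ++ " " ++ st.2)

-- loop 3 body: if k in rest and (best is None or len(k) > len(best[0])): best = (k, v)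
def owStep3 (rest : PySem.Dict String String) (st : Option (String × String)) (kv : String × String) : Option (String × String) :=
  if rest.contains kv.1 && (match st with
      | none => true
      | some b => decide (PySem.Str.len b.1 < PySem.Str.len kv.1)) then
    some kv
  else st

def onewordify_alt (string : String) (td_dict : List (String × String)) : String :=
  let words := PySem.Str.split₀ string
  let n : Int := PySem.List.len words
  let pref := (words.foldl owStep1 ("", [])).2
  let suf0 := if n == 0 then "" else PySem.List.pyGetD words (n - 1) ""
  let rest := ((PySem.List.pyRange (n - 1) 0 (-1)).foldl (owStep2 words pref) (PySem.Dict.empty, suf0)).1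
  match td_dict.foldl (owStep3 rest) none with
  | none => string
  | some b => b.2 ++ " " ++ PySem.Dict.getD rest b.1 ""   -- rest[best[0]]; best[0] is always a key of rest

-- ===== PRECONDITION & SPEC =====
def Spec_onewordify (string : String) (td_dict : List (String × String)) (out : String) : Prop := out = onewordify_alt string td_dict
instance (string : String) (td_dict : List (String × String)) (out : String) : Decidable (Spec_onewordify string td_dict out) := by unfold Spec_onewordify; infer_instance

-- ===== CLAIM (what is proved, stated in full; the proofs are below) =====
def Claim_equal_onewordify : Prop := ∀ (string : String) (td_dict : List (String × String)), Dom_onewordify string td_dict → Spec_onewordify string td_dict (onewordify string td_dict)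

-- ===== LEMMAS AND PROOFS =====

-- " ".join(words[:k]) and " ".join(words[k:])
def owP (words : List String) (k : Nat) : String := PySem.Str.join " " (words.take k)
def owS (words : List String) (k : Nat) : String := PySem.Str.join " " (words.drop k)

-- the descending list [m, m-1, ..., 1] of candidate prefix word-counts
def owDesc : Nat → List Nat
  | 0 => []
  | m + 1 => (m + 1) :: owDesc m

-- the common mathematical form: try prefix word-counts in the order given, return on first dict hit
def owGoSpec (string : String) (td_dict : List (String × String)) (words : List String) : List Nat → String
  | [] => string
  | k :: ks =>
    match List.lookup (owP words k) td_dict with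
    | some v => v ++ " " ++ owS words k
    | none => owGoSpec string td_dict words ks

theorem owMem_desc (m k : Nat) : k ∈ owDesc m ↔ 1 ≤ k ∧ k ≤ m := by
  induction m with
  | zero => simp [owDesc]; omega
  | succ m ih => simp [owDesc, ih]; omega

-- joining a concatenation of two nonempty lists of words splits around one separator
theorem pv_join_append (sep : List Char) : ∀ (xs ys : List (List Char)), xs ≠ [] → ys ≠ [] →
    PySem.Chars.join sep (xs ++ ys) = PySem.Chars.join sep xs ++ sep ++ PySem.Chars.join sep ys
  | [], _, hx, _ => absurd rfl hx
  | [x], y :: ys', _, _ => by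
    simp only [List.cons_append, List.nil_append, PySem.Chars.join_cons_cons,
      PySem.Chars.join_singleton]
  | x1 :: x2 :: xs'', ys, _, hy => by
    have ih := pv_join_append sep (x2 :: xs'') ys (by simp) hy
    simp only [List.cons_append, PySem.Chars.join_cons_cons] at *
    rw [ih]
    simp [List.append_assoc]

-- String-level: " ".join of a nonempty ++ nonempty splits around one space
theorem owJoin_append (xs ys : List String) (hx : xs ≠ []) (hy : ys ≠ []) :
    PySem.Str.join " " (xs ++ ys) = PySem.Str.join " " xs ++ " " ++ PySem.Str.join " " ys := by
  apply String.toList_injective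
  rw [String.toList_append, String.toList_append, PySem.Str.toList_join, PySem.Str.toList_join,
    List.map_append, pv_join_append _ _ _ (by simpa using hx) (by simpa using hy),
    PySem.Str.toList_join]

theorem owJoin_pair (x y : String) : PySem.Str.join " " [x, y] = x ++ " " ++ y := by
  apply String.toList_injective
  rw [String.toList_append, String.toList_append, PySem.Str.toList_join]
  simp [PySem.Chars.join_cons_cons, PySem.Chars.join_singleton]

theorem owJoin_singleton (x : String) : PySem.Str.join " " [x] = x := by
  apply String.toList_injective
  rw [PySem.Str.toList_join]
  simp [PySem.Chars.join_singleton]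

-- one more word makes the prefix join strictly longer
theorem owLenP_succ (words : List String) (k : Nat) (hk1 : 1 ≤ k) (hk : k < words.length) :
    PySem.Str.len (owP words k) < PySem.Str.len (owP words (k + 1)) := by
  have h : words.take (k + 1) = words.take k ++ [words[k]] := by
    rw [List.take_add_one]; simp [List.getElem?_eq_getElem hk]
  have hne : words.take k ≠ [] := by
    intro hc
    have := congrArg List.length hc
    simp only [List.length_take, List.length_nil] at this
    omega
  unfold owP
  rw [h, owJoin_append (words.take k) [words[k]] hne (by simp)]
  simp [PySem.Str.len_eq]

-- length of a prefix join, strictly monotone in the word count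
theorem owLenP_lt (words : List String) (j k : Nat) (hj : 1 ≤ j) :
    j < k → k ≤ words.length → PySem.Str.len (owP words j) < PySem.Str.len (owP words k) := by
  induction k with
  | zero => omega
  | succ k ih =>
    intro hjk hk
    rcases Nat.lt_succ_iff_lt_or_eq.mp hjk with h | h
    · exact lt_trans (ih h (by omega)) (owLenP_succ words k (by omega) (by omega))
    · subst h; exact owLenP_succ words j hj (by omega)

theorem owP_inj (words : List String) (j k : Nat) (hj : 1 ≤ j) (hk : 1 ≤ k)
    (hjn : j ≤ words.length) (hkn : k ≤ words.length) (h : owP words j = owP words k) : j = k := by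
  by_contra hne
  rcases Nat.lt_or_ge j k with hlt | hge
  · have := owLenP_lt words j k hj hlt hkn
    rw [h] at this
    omega
  · have hlt : k < j := by omega
    have := owLenP_lt words k j hk hlt hjn
    rw [h] at this
    omega

-- ===== A-side characterisation =====
theorem owGoA_eq (s : String) (td : List (String × String)) (words : List String) (m : Nat)
    (hm : m + 1 ≤ words.length) :
    onewordifyGoA s td words (PySem.List.pyRange ((words.length : Int) - m) (words.length : Int) 1)
      = owGoSpec s td words (owDesc m) := by
  induction m with
  | zero =>
    rw [PySem.List.pyRange_one_eq_nil (by omega)]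
    simp [onewordifyGoA, owGoSpec, owDesc]
  | succ m ih =>
    have h1 : ((words.length : Int) - ((m : Int) + 1)) < (words.length : Int) := by omega
    have hcast : ((m + 1 : Nat) : Int) = (m : Int) + 1 := by push_cast; ring
    rw [hcast, PySem.List.pyRange_one_cons h1]
    have e2 : ((words.length : Int) - ((m : Int) + 1)) + 1 = (words.length : Int) - (m : Int) := by ring
    rw [e2]
    simp only [onewordifyGoA]
    have hk : 0 < words.length - (m + 1) := by omega
    have hneg : -((words.length : Int) - ((m : Int) + 1)) = -(((words.length - (m + 1) : Nat)) : Int) := by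
      omega
    rw [hneg, PySem.List.slice_to_neg_natCast words _ hk, PySem.List.slice_from_neg_natCast words _ hk]
    have htake : words.length - (words.length - (m + 1)) = m + 1 := by omega
    rw [htake]
    show (match List.lookup (owP words (m + 1)) td with
      | some newpart => PySem.Str.join " " [newpart, owS words (m + 1)]
      | none => onewordifyGoA s td words (PySem.List.pyRange ((words.length : Int) - (m : Int)) (words.length : Int) 1))
      = owGoSpec s td words (owDesc (m + 1))
    rw [ih (by omega)]
    show _ = owGoSpec s td words ((m + 1) :: owDesc m)
    simp only [owGoSpec]
    cases List.lookup (owP words (m + 1)) td with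
    | some v => simp [owJoin_pair]
    | none => rfl

theorem owA_eq (s : String) (td : List (String × String)) :
    onewordify s td = owGoSpec s td (PySem.Str.split₀ s) (owDesc ((PySem.Str.split₀ s).length - 1)) := by
  unfold onewordify
  rcases Nat.eq_zero_or_pos (PySem.Str.split₀ s).length with h0 | hpos
  · show onewordifyGoA s td (PySem.Str.split₀ s)
      (PySem.List.pyRange 1 ((PySem.Str.split₀ s).length : Int) 1) = _
    rw [PySem.List.pyRange_one_eq_nil (by simp [h0]), h0]
    simp [onewordifyGoA, owGoSpec, owDesc]
  · have := owGoA_eq s td (PySem.Str.split₀ s) ((PySem.Str.split₀ s).length - 1) (by omega)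
    have e : ((PySem.Str.split₀ s).length : Int) - (((PySem.Str.split₀ s).length - 1 : Nat) : Int) = 1 := by
      omega
    rw [e] at this
    exact this

-- ===== B-side: the prefix list =====
theorem owFold1 (ws : List String) (hne : ws ≠ []) :
    ws.foldl owStep1 ("", []) = (PySem.Str.join " " ws, (List.range' 1 ws.length).map (owP ws)) := by
  induction ws using List.reverseRecOn with
  | nil => exact absurd rfl hne
  | append_singleton xs x ih =>
    rw [List.foldl_append]
    rcases eq_or_ne xs ([] : List String) with h0 | hxs
    · subst h0
      have h1 : owP [x] 1 = x := by
        unfold owP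
        simp [owJoin_singleton]
      simp [owStep1, owJoin_singleton, h1]
    · rw [ih hxs]
      have hlen : 1 ≤ xs.length := by
        cases xs with
        | nil => exact absurd rfl hxs
        | cons a l => simp
      have hpne : ((List.range' 1 xs.length).map (owP xs)).isEmpty = false := by
        simp [List.isEmpty_eq_false_iff, List.range'_eq_nil_iff]
        omega
      simp only [List.foldl_cons, List.foldl_nil, owStep1, hpne]
      simp only [Bool.false_eq_true, if_false]
      have hacc : PySem.Str.join " " xs ++ " " ++ x = PySem.Str.join " " (xs ++ [x]) := by
        rw [owJoin_append xs [x] hxs (by simp)]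
        simp [owJoin_singleton]
      have hlast : owP (xs ++ [x]) (xs.length + 1) = PySem.Str.join " " (xs ++ [x]) := by
        unfold owP
        rw [List.take_of_length_le (by simp)]
      have hcong : (List.range' 1 xs.length).map (owP xs)
          = (List.range' 1 xs.length).map (owP (xs ++ [x])) := by
        apply List.map_congr_left
        intro k hk
        have hk' : k ≤ xs.length := by
          have := List.mem_range'_1.mp hk
          omega
        unfold owP
        rw [List.take_append_of_le_length hk']
      have hrange : List.range' 1 (xs.length + 1) = List.range' 1 xs.length ++ [xs.length + 1] := by
        rw [List.range'_concat]
        simp [Nat.add_comm]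
      simp only [List.length_append, List.length_cons, List.length_nil]
      rw [hrange, List.map_append, ← hcong, hacc]
      simp [hlast]

-- ===== B-side: the rest dict =====
theorem owPrefGet (words pref : List String) (m : Nat) (h1 : 1 ≤ m) (h2 : m ≤ words.length)
    (hpref : pref = (List.range' 1 words.length).map (owP words)) :
    PySem.List.pyGetD pref ((m : Int) - 1) "" = owP words m := by
  have e : (m : Int) - 1 = ((m - 1 : Nat) : Int) := by omega
  rw [e, hpref, PySem.List.pyGetD_natCast]
  have hlt : m - 1 < ((List.range' 1 words.length).map (owP words)).length := by
    simp [List.length_range']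
    omega
  rw [List.getD_eq_getElem _ _ hlt]
  have hlt2 : m - 1 < (List.range' 1 words.length).length := by
    simp [List.length_range']
    omega
  rw [List.getElem_map]
  have : (List.range' 1 words.length)[m - 1] = 1 + (m - 1) := by
    simp [List.getElem_range']
  rw [this]
  congr 1
  omega

theorem owWordGet (words : List String) (m : Nat) (h1 : 1 ≤ m) (h2 : m ≤ words.length) :
    PySem.List.pyGetD words ((m : Int) - 1) "" = words.getD (m - 1) "" := by
  have e : (m : Int) - 1 = ((m - 1 : Nat) : Int) := by omega
  rw [e, PySem.List.pyGetD_natCast]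

theorem owS_cons (words : List String) (m : Nat) (h1 : 1 ≤ m) (h2 : m < words.length) :
    words.getD (m - 1) "" ++ " " ++ owS words m = owS words (m - 1) := by
  have hm1 : m - 1 < words.length := by omega
  have hd : words.drop (m - 1) = words[m - 1] :: words.drop m := by
    have e : m - 1 + 1 = m := by omega
    rw [List.drop_eq_getElem_cons hm1, e]
  unfold owS
  rw [hd, show (words[m - 1] :: words.drop m) = [words[m - 1]] ++ words.drop m from rfl,
    owJoin_append [words[m - 1]] (words.drop m) (by simp) (by simp [List.drop_eq_nil_iff]; omega),
    owJoin_singleton, List.getD_eq_getElem _ _ hm1]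

theorem owRest_get_ne (words pref : List String) (m : Nat) (hm : m ≤ words.length - 1)
    (d : PySem.Dict String String) (suf : String) (x : String)
    (hpref : pref = (List.range' 1 words.length).map (owP words))
    (hx : ∀ k, 1 ≤ k → k ≤ m → x ≠ owP words k) :
    (((PySem.List.pyRange (m : Int) 0 (-1)).foldl (owStep2 words pref) (d, suf)).1).get? x = d.get? x := by
  induction m generalizing d suf with
  | zero =>
    rw [show ((0 : Nat) : Int) = (0 : Int) from rfl, PySem.List.pyRange_neg_one_eq_nil (by omega)]
    rfl
  | succ m ih =>
    have ec : ((m + 1 : Nat) : Int) = (m : Int) + 1 := by push_cast; ring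
    rw [ec, PySem.List.pyRange_neg_one_cons (by omega)]
    simp only [List.foldl_cons]
    rw [show (m : Int) + 1 - 1 = (m : Int) from by ring]
    have hstep : owStep2 words pref (d, suf) ((m : Int) + 1)
        = (d.insert (owP words (m + 1)) suf,
           PySem.List.pyGetD words (((m + 1 : Nat) : Int) - 1) "" ++ " " ++ suf) := by
      show (d.insert (PySem.List.pyGetD pref ((m : Int) + 1 - 1) "") suf,
        PySem.List.pyGetD words ((m : Int) + 1 - 1) "" ++ " " ++ suf) = _
      rw [show (m : Int) + 1 - 1 = ((m + 1 : Nat) : Int) - 1 from by push_cast; ring,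
        owPrefGet words pref (m + 1) (by omega) (by omega) hpref]
    rw [hstep]
    rw [ih (by omega) _ _ (fun k hk1 hk2 => hx k hk1 (by omega))]
    rw [PySem.Dict.get?_insert]
    exact if_neg (hx (m + 1) (by omega) (by omega))

theorem owRest_get_P (words pref : List String) (m : Nat) (hm : m ≤ words.length - 1)
    (d : PySem.Dict String String) (k : Nat) (hk1 : 1 ≤ k) (hkm : k ≤ m)
    (hpref : pref = (List.range' 1 words.length).map (owP words)) :
    (((PySem.List.pyRange (m : Int) 0 (-1)).foldl (owStep2 words pref) (d, owS words m)).1).get? (owP words k)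
      = some (owS words k) := by
  induction m generalizing d with
  | zero => omega
  | succ m ih =>
    have ec : ((m + 1 : Nat) : Int) = (m : Int) + 1 := by push_cast; ring
    rw [ec, PySem.List.pyRange_neg_one_cons (by omega)]
    simp only [List.foldl_cons]
    rw [show (m : Int) + 1 - 1 = (m : Int) from by ring]
    have hsuf : PySem.List.pyGetD words (((m + 1 : Nat) : Int) - 1) "" ++ " " ++ owS words (m + 1)
        = owS words m := by
      rw [owWordGet words (m + 1) (by omega) (by omega)]
      have hs := owS_cons words (m + 1) (by omega) (by omega)
      simpa using hs
    have hstep : owStep2 words pref (d, owS words (m + 1)) ((m : Int) + 1)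
        = (d.insert (owP words (m + 1)) (owS words (m + 1)), owS words m) := by
      show (d.insert (PySem.List.pyGetD pref ((m : Int) + 1 - 1) "") (owS words (m + 1)),
        PySem.List.pyGetD words ((m : Int) + 1 - 1) "" ++ " " ++ owS words (m + 1)) = _
      rw [show (m : Int) + 1 - 1 = ((m + 1 : Nat) : Int) - 1 from by push_cast; ring,
        owPrefGet words pref (m + 1) (by omega) (by omega) hpref, hsuf]
    rw [hstep]
    rcases Nat.lt_or_ge k (m + 1) with hlt | hge
    · exact ih (by omega) (d.insert (owP words (m + 1)) (owS words (m + 1))) (by omega)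
    · have hk : k = m + 1 := by omega
      subst hk
      rw [owRest_get_ne words pref m (by omega) _ _ _ hpref
        (fun j hj1 hj2 => fun hc => by
          have := owP_inj words (m + 1) j (by omega) hj1 (by omega) (by omega) hc
          omega)]
      rw [PySem.Dict.get?_insert]
      exact if_pos rfl

-- ===== B-side: the dictionary scan =====
theorem owLookup_append {β : Type} (x : String) (l1 l2 : List (String × β)) :
    List.lookup x (l1 ++ l2) = (List.lookup x l1).or (List.lookup x l2) := by
  induction l1 with
  | nil => simp
  | cons p t ih =>
    obtain ⟨a, b⟩ := p
    rw [List.cons_append, List.lookup_cons, List.lookup_cons]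
    cases hx : x == a with
    | true => simp
    | false => simpa using ih

theorem owDesc_find?_none (m : Nat) (p : Nat → Bool) :
    (owDesc m).find? p = none ↔ ∀ k, 1 ≤ k → k ≤ m → p k = false := by
  rw [List.find?_eq_none]
  constructor
  · intro h k hk1 hk2
    have := h k ((owMem_desc m k).mpr ⟨hk1, hk2⟩)
    simpa using this
  · intro h k hk
    have := (owMem_desc m k).mp hk
    simp [h k this.1 this.2]

theorem owDesc_find?_some (m : Nat) (p : Nat → Bool) (k : Nat) :
    (owDesc m).find? p = some k ↔
      (1 ≤ k ∧ k ≤ m ∧ p k = true ∧ ∀ j, k < j → j ≤ m → p j = false) := by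
  induction m with
  | zero => simp [owDesc]; omega
  | succ m ih =>
    show (((m + 1) :: owDesc m).find? p = some k) ↔ _
    by_cases hp : p (m + 1) = true
    · rw [List.find?_cons_of_pos hp]
      constructor
      · intro h
        have hk : k = m + 1 := by injection h; omega
        subst hk
        exact ⟨by omega, le_refl _, hp, fun j hj1 hj2 => by omega⟩
      · rintro ⟨hk1, hk2, hpk, hall⟩
        rcases Nat.lt_or_ge k (m + 1) with hlt | hge
        · have := hall (m + 1) hlt (le_refl _)
          rw [hp] at this
          exact absurd this (by simp)
        · congr 1
          omega
    · rw [List.find?_cons_of_neg (by simpa using hp)]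
      rw [ih]
      constructor
      · rintro ⟨hk1, hk2, hpk, hall⟩
        refine ⟨hk1, by omega, hpk, fun j hj1 hj2 => ?_⟩
        rcases Nat.lt_or_ge j (m + 1) with hlt | hge
        · exact hall j hj1 (by omega)
        · have hj : j = m + 1 := by omega
          subst hj
          simpa using hp
      · rintro ⟨hk1, hk2, hpk, hall⟩
        have hkm : k ≤ m := by
          rcases Nat.lt_or_ge k (m + 1) with hlt | hge
          · omega
          · have hk : k = m + 1 := by omega
            subst hk
            exact absurd hpk hp
        exact ⟨hk1, hkm, hpk, fun j hj1 hj2 => hall j hj1 (by omega)⟩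

theorem owFold_char (s : String) (words : List String) (rest : PySem.Dict String String)
    (hc : ∀ x, rest.contains x = true ↔ ∃ k, 1 ≤ k ∧ k ≤ words.length - 1 ∧ x = owP words k)
    (td : List (String × String)) :
    (td.foldl (owStep3 rest) none = none ∧
      (owDesc (words.length - 1)).find? (fun k => (List.lookup (owP words k) td).isSome) = none) ∨
    (∃ k v, 1 ≤ k ∧ k ≤ words.length - 1 ∧
      (owDesc (words.length - 1)).find? (fun j => (List.lookup (owP words j) td).isSome) = some k ∧
      List.lookup (owP words k) td = some v ∧
      td.foldl (owStep3 rest) none = some (owP words k, v)) := by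
  induction td using List.reverseRecOn with
  | nil =>
    left
    refine ⟨rfl, ?_⟩
    rw [owDesc_find?_none]
    intro k _ _
    simp
  | append_singleton td ab ih =>
    obtain ⟨a, b⟩ := ab
    rw [List.foldl_append, List.foldl_cons, List.foldl_nil]
    by_cases ha : ∃ j, 1 ≤ j ∧ j ≤ words.length - 1 ∧ a = owP words j
    · obtain ⟨j, hj1, hj2, haj⟩ := ha
      subst haj
      have hn2 : 2 ≤ words.length := by omega
      have hca : rest.contains (owP words j) = true := (hc _).mpr ⟨j, hj1, hj2, rfl⟩
      -- the appended singleton only matches the key owP words j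
      have hsing : ∀ j', 1 ≤ j' → j' ≤ words.length - 1 → j' ≠ j →
          List.lookup (owP words j') [(owP words j, b)] = none := by
        intro j' h1 h2 hne
        have hne' : owP words j' ≠ owP words j := fun hcc =>
          hne (owP_inj words j' j h1 hj1 (by omega) (by omega) hcc)
        have hb : (owP words j' == owP words j) = false := beq_eq_false_iff_ne.mpr hne'
        simp [List.lookup_cons, hb]
      have hself : List.lookup (owP words j) [(owP words j, b)] = some b := by simp
      rcases ih with ⟨hfold, hfind⟩ | ⟨k, v, hk1, hk2, hfind, hlook, hfold⟩
      · -- td had no matching key: the scan now picks (owP words j, b)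
        rw [hfold]
        have hnone := (owDesc_find?_none _ _).mp hfind
        have hlknone : ∀ j', 1 ≤ j' → j' ≤ words.length - 1 →
            List.lookup (owP words j') td = none := by
          intro j' h1 h2
          have := hnone j' h1 h2
          simpa using this
        right
        refine ⟨j, b, hj1, hj2, ?_, ?_, by simp [owStep3, hca]⟩
        · rw [owDesc_find?_some]
          refine ⟨hj1, hj2, ?_, ?_⟩
          · rw [owLookup_append, hlknone j hj1 hj2, hself]
            rfl
          · intro j' hjj' hj'
            rw [owLookup_append, hlknone j' (by omega) hj', hsing j' (by omega) hj' (by omega)]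
            rfl
        · rw [owLookup_append, hlknone j hj1 hj2, hself]
          rfl
      · -- td's best matching key is owP words k
        rw [hfold]
        have hchar := (owDesc_find?_some _ _ _).mp hfind
        obtain ⟨-, -, hpk, hall⟩ := hchar
        have hlknone : ∀ j', k < j' → j' ≤ words.length - 1 →
            List.lookup (owP words j') td = none := by
          intro j' h1 h2
          have := hall j' h1 h2
          simpa using this
        rcases Nat.lt_or_ge k j with hkj | hjk
        · -- new key strictly longer: state replaced
          have hlt : PySem.Str.len (owP words k) < PySem.Str.len (owP words j) :=
            owLenP_lt words k j hk1 hkj (by omega)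
          have hlt' : (owP words k).length < (owP words j).length := by
            have := hlt
            simp only [PySem.Str.len_eq] at this
            exact_mod_cast this
          right
          refine ⟨j, b, hj1, hj2, ?_, ?_, by simp [owStep3, hca, hlt']⟩
          · rw [owDesc_find?_some]
            refine ⟨hj1, hj2, ?_, ?_⟩
            · rw [owLookup_append, hlknone j hkj hj2, hself]
              rfl
            · intro j' hjj' hj'
              rw [owLookup_append, hlknone j' (by omega) hj', hsing j' (by omega) hj' (by omega)]
              rfl
          · rw [owLookup_append, hlknone j hkj hj2, hself]
            rfl
        · -- new key not longer: state kept
          have hnlt : ¬ PySem.Str.len (owP words k) < PySem.Str.len (owP words j) := by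
            rcases Nat.lt_or_ge j k with hlt | hge
            · have := owLenP_lt words j k hj1 hlt (by omega)
              omega
            · have hjk' : j = k := by omega
              subst hjk'
              omega
          have hnlt' : ¬ (owP words k).length < (owP words j).length := by
            intro hcc
            apply hnlt
            simp only [PySem.Str.len_eq]
            exact_mod_cast hcc
          right
          refine ⟨k, v, hk1, hk2, ?_, ?_, by simp [owStep3, hca, hnlt']⟩
          · rw [owDesc_find?_some]
            refine ⟨hk1, hk2, ?_, ?_⟩
            · rw [owLookup_append, hlook]
              rfl
            · intro j' hjj' hj'
              rw [owLookup_append, hlknone j' hjj' hj', hsing j' (by omega) hj' (by omega)]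
              rfl
          · rw [owLookup_append, hlook]
            rfl
    · -- appended key is not a prefix join: nothing changes
      have hca : rest.contains a = false := by
        cases h : rest.contains a
        · rfl
        · exact absurd ((hc a).mp h) ha
      rw [show owStep3 rest (td.foldl (owStep3 rest) none) (a, b) = td.foldl (owStep3 rest) none
        from by simp [owStep3, hca]]
      have hlk : ∀ k, 1 ≤ k → k ≤ words.length - 1 →
          List.lookup (owP words k) (td ++ [(a, b)]) = List.lookup (owP words k) td := by
        intro k hk1 hk2
        have hb : (owP words k == a) = false :=
          beq_eq_false_iff_ne.mpr (fun hcc => ha ⟨k, hk1, hk2, hcc.symm⟩)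
        rw [owLookup_append]
        simp [List.lookup_cons, hb]
      rcases ih with ⟨hfold, hfind⟩ | ⟨k, v, hk1, hk2, hfind, hlook, hfold⟩
      · left
        refine ⟨hfold, ?_⟩
        rw [owDesc_find?_none] at hfind ⊢
        intro k hk1 hk2
        rw [hlk k hk1 hk2]
        exact hfind k hk1 hk2
      · right
        refine ⟨k, v, hk1, hk2, ?_, ?_, hfold⟩
        · rw [owDesc_find?_some] at hfind ⊢
          obtain ⟨-, -, hpk, hall⟩ := hfind
          exact ⟨hk1, hk2, by rw [hlk k hk1 hk2]; exact hpk,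
            fun j hj1 hj2 => by rw [hlk j (by omega) hj2]; exact hall j hj1 hj2⟩
        · rw [hlk k hk1 hk2]
          exact hlook

-- goSpec in terms of find? over the same candidate list
theorem owGoSpec_char (s : String) (td : List (String × String)) (words : List String) (ks : List Nat) :
    owGoSpec s td words ks =
      match ks.find? (fun k => (List.lookup (owP words k) td).isSome) with
      | none => s
      | some k =>
        match List.lookup (owP words k) td with
        | some v => v ++ " " ++ owS words k
        | none => s := by
  induction ks with
  | nil => simp [owGoSpec]
  | cons k ks ih =>
    simp only [owGoSpec]
    cases h : List.lookup (owP words k) td with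
    | some v =>
      rw [List.find?_cons_of_pos (by simp [h])]
      simp [h]
    | none =>
      rw [List.find?_cons_of_neg (by simp [h])]
      exact ih

-- assembling B's value from the scan result
theorem owB_final (s : String) (td : List (String × String)) (words : List String)
    (rest : PySem.Dict String String)
    (hcontains : ∀ x, rest.contains x = true ↔ ∃ k, 1 ≤ k ∧ k ≤ words.length - 1 ∧ x = owP words k)
    (hget : ∀ k, 1 ≤ k → k ≤ words.length - 1 → rest.get? (owP words k) = some (owS words k)) :
    (match td.foldl (owStep3 rest) none with
     | none => s
     | some b => b.2 ++ " " ++ PySem.Dict.getD rest b.1 "")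
      = owGoSpec s td words (owDesc (words.length - 1)) := by
  rcases owFold_char s words rest hcontains td with ⟨hfold, hfind⟩ | ⟨k, v, hk1, hk2, hfind, hlook, hfold⟩
  · rw [hfold, owGoSpec_char, hfind]
  · rw [hfold, owGoSpec_char, hfind]
    show v ++ " " ++ PySem.Dict.getD rest (owP words k) ""
      = (match List.lookup (owP words k) td with
         | some v => v ++ " " ++ owS words k
         | none => s)
    rw [hlook]
    show v ++ " " ++ PySem.Dict.getD rest (owP words k) "" = v ++ " " ++ owS words k
    rw [PySem.Dict.getD_eq_get?_getD, hget k hk1 hk2]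
    rfl

-- onewordify_alt with its rest dict abstracted
theorem owAlt_expand (s : String) (td : List (String × String)) (rest : PySem.Dict String String)
    (hrest : ((PySem.List.pyRange (PySem.List.len (PySem.Str.split₀ s) - 1) 0 (-1)).foldl
      (owStep2 (PySem.Str.split₀ s) ((PySem.Str.split₀ s).foldl owStep1 ("", [])).2)
      (PySem.Dict.empty, if PySem.List.len (PySem.Str.split₀ s) == 0 then ""
        else PySem.List.pyGetD (PySem.Str.split₀ s) (PySem.List.len (PySem.Str.split₀ s) - 1) "")).1 = rest) :
    onewordify_alt s td = match td.foldl (owStep3 rest) none with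
      | none => s
      | some b => b.2 ++ " " ++ PySem.Dict.getD rest b.1 "" := by
  subst hrest
  rfl

-- ===== VERDICT (by name: the statement is the Claim_ definition above) =====
theorem onewordify_spec : Claim_equal_onewordify := by
  intro s td _
  unfold Spec_onewordify
  rw [owA_eq]
  have hlen : PySem.List.len (PySem.Str.split₀ s) = ((PySem.Str.split₀ s).length : Int) := by simp
  rcases Nat.lt_or_ge (PySem.Str.split₀ s).length 2 with hsmall | hbig
  · -- fewer than two words: the range is empty and rest is the empty dict
    have hR : ((PySem.List.pyRange (PySem.List.len (PySem.Str.split₀ s) - 1) 0 (-1)).foldl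
        (owStep2 (PySem.Str.split₀ s) ((PySem.Str.split₀ s).foldl owStep1 ("", [])).2)
        (PySem.Dict.empty, if PySem.List.len (PySem.Str.split₀ s) == 0 then ""
          else PySem.List.pyGetD (PySem.Str.split₀ s) (PySem.List.len (PySem.Str.split₀ s) - 1) "")).1
        = PySem.Dict.empty := by
      rw [hlen, PySem.List.pyRange_neg_one_eq_nil (by omega)]
      rfl
    rw [owAlt_expand s td PySem.Dict.empty hR]
    refine (owB_final s td (PySem.Str.split₀ s) PySem.Dict.empty ?_ ?_).symm
    · intro x
      constructor
      · intro h
        rw [PySem.Dict.contains_empty] at h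
        exact absurd h (by simp)
      · rintro ⟨k, hk1, hk2, -⟩
        omega
    · intro k hk1 hk2
      omega
  · -- at least two words
    have hne : PySem.Str.split₀ s ≠ [] := by
      intro hcc
      rw [hcc] at hbig
      simp at hbig
    have hpref : ((PySem.Str.split₀ s).foldl owStep1 ("", [])).2
        = (List.range' 1 (PySem.Str.split₀ s).length).map (owP (PySem.Str.split₀ s)) := by
      rw [owFold1 _ hne]
    have hcast : PySem.List.len (PySem.Str.split₀ s) - 1
        = (((PySem.Str.split₀ s).length - 1 : Nat) : Int) := by
      rw [hlen]
      omega
    have hbeq : (PySem.List.len (PySem.Str.split₀ s) == (0 : Int)) = false := by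
      rw [hlen]
      simp
      omega
    have hsuf0 : (if PySem.List.len (PySem.Str.split₀ s) == 0 then ""
        else PySem.List.pyGetD (PySem.Str.split₀ s) (PySem.List.len (PySem.Str.split₀ s) - 1) "")
        = owS (PySem.Str.split₀ s) ((PySem.Str.split₀ s).length - 1) := by
      rw [hbeq]
      simp only [Bool.false_eq_true, if_false]
      rw [show PySem.List.len (PySem.Str.split₀ s) - 1
          = (((PySem.Str.split₀ s).length : Nat) : Int) - 1 from by rw [hlen],
        owWordGet _ _ (by omega) (le_refl _)]
      have hlt : (PySem.Str.split₀ s).length - 1 < (PySem.Str.split₀ s).length := by omega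
      have hdrop : (PySem.Str.split₀ s).drop ((PySem.Str.split₀ s).length - 1)
          = [(PySem.Str.split₀ s)[(PySem.Str.split₀ s).length - 1]] := by
        rw [List.drop_eq_getElem_cons hlt]
        rw [show (PySem.Str.split₀ s).length - 1 + 1 = (PySem.Str.split₀ s).length from by omega]
        simp
      unfold owS
      rw [hdrop, owJoin_singleton, List.getD_eq_getElem _ _ hlt]
    set R := ((PySem.List.pyRange (PySem.List.len (PySem.Str.split₀ s) - 1) 0 (-1)).foldl
        (owStep2 (PySem.Str.split₀ s) ((PySem.Str.split₀ s).foldl owStep1 ("", [])).2)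
        (PySem.Dict.empty, if PySem.List.len (PySem.Str.split₀ s) == 0 then ""
          else PySem.List.pyGetD (PySem.Str.split₀ s) (PySem.List.len (PySem.Str.split₀ s) - 1) "")).1
      with hRdef
    have hget : ∀ k, 1 ≤ k → k ≤ (PySem.Str.split₀ s).length - 1 →
        R.get? (owP (PySem.Str.split₀ s) k) = some (owS (PySem.Str.split₀ s) k) := by
      intro k hk1 hk2
      rw [hRdef, hsuf0, hcast]
      exact owRest_get_P (PySem.Str.split₀ s) _ ((PySem.Str.split₀ s).length - 1)
        (le_refl _) PySem.Dict.empty k hk1 hk2 hpref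
    have hcontains : ∀ x, R.contains x = true ↔
        ∃ k, 1 ≤ k ∧ k ≤ (PySem.Str.split₀ s).length - 1 ∧ x = owP (PySem.Str.split₀ s) k := by
      intro x
      constructor
      · intro h
        by_contra hno
        have hx : ∀ k, 1 ≤ k → k ≤ (PySem.Str.split₀ s).length - 1 →
            x ≠ owP (PySem.Str.split₀ s) k := fun k h1 h2 hcc => hno ⟨k, h1, h2, hcc⟩
        have hg : R.get? x = PySem.Dict.empty.get? x := by
          rw [hRdef, hcast]
          exact owRest_get_ne (PySem.Str.split₀ s) _ ((PySem.Str.split₀ s).length - 1)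
            (le_refl _) PySem.Dict.empty _ x hpref hx
        rw [PySem.Dict.contains_eq_isSome_get?, hg] at h
        rw [PySem.Dict.get?_empty] at h
        exact absurd h (by simp)
      · rintro ⟨k, hk1, hk2, rfl⟩
        rw [PySem.Dict.contains_eq_isSome_get?, hget k hk1 hk2]
        rfl
    rw [owAlt_expand s td R hRdef.symm]
    exact (owB_final s td (PySem.Str.split₀ s) R hcontains hget).symm
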